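-- pv_equiv track=rewrite | github.com/MartinKnaze/AmazonScraper | SequentialScraper.py | find_max_finished_layer
-- ===== SOURCE A (Python) =====
-- def find_max_finished_layer(data):
--     max_finished_layer = len(max(data.keys(), key=len))
--     finished = True
--     if max_finished_layer != 0:
--         for i in range(max_finished_layer, 0, -1):
--             finished = True
--             for key in data:
--                 if len(key) == i:
--                     if data[key] == "":
--                         finished = False
--             if finished:
--                 max_finished_layer = i
--                 break
--         if not finished:
--             max_finished_layer = 0
--
--     return max_finished_layer
-- ===== SOURCE B (Python) =====
-- def find_max_finished_layer(data):
--     # One pass: record the max key length and the set of lengths having an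
--     # empty value; then scan lengths downward for the first clean one.
--     maxlen = 0
--     bad = set()
--     for key, value in data.items():
--         L = len(key)
--         if L > maxlen:
--             maxlen = L
--         if value == "":
--             bad.add(L)
--     for i in range(maxlen, 0, -1):
--         if i not in bad:
--             return i
--     return 0
-- ===== Notes on version B (the rewrite author's own statement) =====
-- stated objective: alternative
-- what changed: Instead of re-scanning every key for each candidate length (and calling max(..., key=len) first), B makes one pass recording the max key length and the set of lengths that have an empty value, then scans lengths downward with O(1) set lookups.
import Mathlib
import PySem

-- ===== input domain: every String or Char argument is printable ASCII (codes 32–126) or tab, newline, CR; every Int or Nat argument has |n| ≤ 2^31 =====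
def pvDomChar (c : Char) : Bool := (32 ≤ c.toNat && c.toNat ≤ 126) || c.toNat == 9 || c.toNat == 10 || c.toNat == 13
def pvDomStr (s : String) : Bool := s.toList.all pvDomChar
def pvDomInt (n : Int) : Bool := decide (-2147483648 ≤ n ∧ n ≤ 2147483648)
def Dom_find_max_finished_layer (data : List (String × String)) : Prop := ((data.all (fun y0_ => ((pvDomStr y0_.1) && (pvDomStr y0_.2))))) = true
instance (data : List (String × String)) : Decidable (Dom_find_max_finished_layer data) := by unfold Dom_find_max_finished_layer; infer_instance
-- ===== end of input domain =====

-- B replaces A's per-length rescans of all keys by one pass (max length + set of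
-- lengths with an empty value) followed by a downward scan with set lookups.
-- ===== PORT A =====
-- inner 'for key in data: if len(key)==i and data[key]=="": finished=False' loop
def pvFinishedAt (data : List (String × String)) (i : Int) : Bool :=
  data.foldl (fun fin kv =>
    if PySem.Str.len kv.1 == i then
      (if (PySem.Dict.mk data).get? kv.1 == some "" then false else fin)
    else fin) true

-- 'for i in range(L, 0, -1): … if finished: break' ; falling off the loop leaves
-- finished = False, so A then sets the result to 0
def pvLoopA (data : List (String × String)) : List Int → Int
  | [] => 0
  | i :: rest => if pvFinishedAt data i then i else pvLoopA data rest

def find_max_finished_layer (data : List (String × String)) : Int :=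
  match PySem.List.max? (data.map Prod.fst) (fun k => PySem.Str.len k) with
  | none => 0   -- Python raises ValueError here (empty dict); excluded by Pre_
  | some m =>
    let L := PySem.Str.len m
    if L ≠ 0 then pvLoopA data (PySem.List.pyRange L 0 (-1)) else L

-- ===== PORT B =====
-- 'for i in range(maxlen, 0, -1): if i not in bad: return i' then 'return 0'
def pvAltScan (bad : PySem.Set Int) : List Int → Int
  | [] => 0
  | i :: rest => if !(PySem.Set.contains bad i) then i else pvAltScan bad rest

def find_max_finished_layer_alt (data : List (String × String)) : Int :=
  let st := data.foldl (fun (st : Int × PySem.Set Int) kv =>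
    (if PySem.Str.len kv.1 > st.1 then PySem.Str.len kv.1 else st.1,
     if kv.2 == "" then PySem.Set.add st.2 (PySem.Str.len kv.1) else st.2))
    (0, PySem.Set.empty)
  pvAltScan st.2 (PySem.List.pyRange st.1 0 (-1))

-- ===== PRECONDITION & SPEC =====
-- Pre_ excludes the empty input, on which A raises ValueError, and lists with
-- duplicate keys, on which the assoc-list model of a Python dict is ambiguous
-- (dict(...) collapses duplicates keeping the last value).
def Pre_find_max_finished_layer (data : List (String × String)) : Prop :=
  data ≠ [] ∧ (data.map Prod.fst).Nodup
instance (data : List (String × String)) : Decidable (Pre_find_max_finished_layer data) := by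
  unfold Pre_find_max_finished_layer; infer_instance

def pvWitness_find_max_finished_layer : (List (String × String)) := [("a", "x")]

def Spec_find_max_finished_layer (data : List (String × String)) (out : Int) : Prop :=
  out = find_max_finished_layer_alt data
instance (data : List (String × String)) (out : Int) : Decidable (Spec_find_max_finished_layer data out) := by
  unfold Spec_find_max_finished_layer; infer_instance

-- ===== CLAIM (what is proved, stated in full; the proofs are below) =====
def Claim_equal_find_max_finished_layer : Prop := ∀ (data : List (String × String)), Dom_find_max_finished_layer data → Pre_find_max_finished_layer data → Spec_find_max_finished_layer data (find_max_finished_layer data)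

-- ===== LEMMAS AND PROOFS =====

-- dict lookup on a duplicate-free assoc list returns the paired value
theorem pv_get?_mk_nodup (data : List (String × String))
    (h : (data.map Prod.fst).Nodup) (kv : String × String) (hm : kv ∈ data) :
    (PySem.Dict.mk data).get? kv.1 = some kv.2 := by
  induction data with
  | nil => cases hm
  | cons hd tl ih =>
    obtain ⟨k, v⟩ := hd
    rw [PySem.Dict.get?_mk_cons]
    rcases List.mem_cons.mp hm with heq | htl
    · subst heq; simp
    · simp only [List.map_cons] at h
      have h' := List.nodup_cons.mp h
      have hne : k ≠ kv.1 := by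
        intro he
        exact h'.1 (he ▸ List.mem_map.mpr ⟨kv, htl, rfl⟩)
      simp only [beq_iff_eq, if_neg hne]
      exact ih h'.2 htl

-- A's inner loop is "no key of length i has an empty value"
theorem pv_finishedAt_eq (data : List (String × String))
    (h : (data.map Prod.fst).Nodup) (i : Int) :
    pvFinishedAt data i
      = !(data.any (fun kv => PySem.Str.len kv.1 == i && kv.2 == "")) := by
  unfold pvFinishedAt
  rw [PySem.List.foldl_congr_mem _ _
      (fun fin kv => if (PySem.Str.len kv.1 == i
          && ((PySem.Dict.mk data).get? kv.1 == some "")) then false else fin) _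
      (by
        intro acc kv _
        by_cases h1 : PySem.Str.len kv.1 = i <;>
          by_cases h2 : (PySem.Dict.mk data).get? kv.1 = some "" <;>
          simp [h2])]
  rw [PySem.List.foldl_if_false_eq]
  simp only [Bool.true_and]
  congr 1
  apply PySem.List.any_congr_mem
  intro kv hkv
  rw [pv_get?_mk_nodup data h kv hkv]
  simp

-- membership in B's "bad" set
theorem pv_mem_bad_gen (data : List (String × String)) (s : PySem.Set Int) (i : Int) :
    i ∈ data.foldl (fun s kv =>
        if kv.2 == "" then PySem.Set.add s (PySem.Str.len kv.1) else s) s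
      ↔ i ∈ s ∨ ∃ kv ∈ data, kv.2 = "" ∧ PySem.Str.len kv.1 = i := by
  induction data generalizing s with
  | nil => simp
  | cons hd tl ih =>
    simp only [List.foldl_cons, ih]
    by_cases he : hd.2 = ""
    · simp only [he, if_pos (by simp : (("" : String) == "") = true),
        PySem.Set.mem_add, List.mem_cons]
      constructor
      · rintro ((h | h) | ⟨kv, hkv, hkv2, hkv3⟩)
        · exact Or.inl h
        · exact Or.inr ⟨hd, Or.inl rfl, he, h.symm⟩
        · exact Or.inr ⟨kv, Or.inr hkv, hkv2, hkv3⟩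
      · rintro (h | ⟨kv, (rfl | hkv), hkv2, hkv3⟩)
        · exact Or.inl (Or.inl h)
        · exact Or.inl (Or.inr hkv3.symm)
        · exact Or.inr ⟨kv, hkv, hkv2, hkv3⟩
    · simp [he]

-- the two scans agree once "finished" matches "not in bad"
theorem pv_scan_eq (data : List (String × String)) (bad : PySem.Set Int)
    (h : ∀ i, pvFinishedAt data i = !(PySem.Set.contains bad i)) (r : List Int) :
    pvLoopA data r = pvAltScan bad r := by
  induction r with
  | nil => rfl
  | cons i rest ih => simp only [pvLoopA, pvAltScan, h i, ih]

theorem pv_main (data : List (String × String))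
    (hne : data ≠ []) (hnd : (data.map Prod.fst).Nodup) :
    find_max_finished_layer data = find_max_finished_layer_alt data := by
  -- name B's two accumulators
  unfold find_max_finished_layer_alt
  rw [PySem.List.foldl_prod_mk
    (f := fun a (kv : String × String) =>
      if PySem.Str.len kv.1 > a then PySem.Str.len kv.1 else a)
    (g := fun s (kv : String × String) =>
      if kv.2 == "" then PySem.Set.add s (PySem.Str.len kv.1) else s)]
  set bad := data.foldl (fun s kv =>
      if kv.2 == "" then PySem.Set.add s (PySem.Str.len kv.1) else s)
      PySem.Set.empty with hbad
  -- B's running max is foldl max over the key lengths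
  have hmf : data.foldl (fun a kv =>
      if PySem.Str.len kv.1 > a then PySem.Str.len kv.1 else a) 0
      = (data.map (fun kv => PySem.Str.len kv.1)).foldl max 0 := by
    rw [List.foldl_map]
    exact PySem.List.foldl_congr_mem _ _ _ _ (by
      intro acc kv _
      by_cases hc : PySem.Str.len kv.1 > acc <;> simp [max_def] <;> omega)
  rw [hmf]
  set M := (data.map (fun kv => PySem.Str.len kv.1)).foldl max 0 with hM
  -- A's head: max(data.keys(), key=len)
  unfold find_max_finished_layer
  obtain ⟨m, hm⟩ : ∃ m, PySem.List.max? (data.map Prod.fst)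
      (fun k => PySem.Str.len k) = some m := by
    cases hq : PySem.List.max? (data.map Prod.fst) (fun k => PySem.Str.len k) with
    | none => exact absurd (List.map_eq_nil_iff.mp
        ((PySem.List.max?_eq_none_iff _ _).mp hq)) hne
    | some m => exact ⟨m, rfl⟩
    
  rw [hm]
  -- len m = M
  have hLM : PySem.Str.len m = M := by
    have hmax := PySem.List.max?_isMax hm
    have hmem := PySem.List.max?_mem hm
    have h1 : PySem.Str.len m ≤ M := by
      have := (PySem.List.le_foldl_max (data.map (fun kv => PySem.Str.len kv.1)) 0).2
      exact this _ (by
        rcases List.mem_map.mp hmem with ⟨kv, hkv, rfl⟩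
        exact List.mem_map.mpr ⟨kv, hkv, rfl⟩)
    have h2 : M ≤ PySem.Str.len m := by
      rcases PySem.List.foldl_max_mem (data.map (fun kv => PySem.Str.len kv.1)) 0 with he | hmm
      · rw [← hM] at he
        rw [he]
        have := PySem.Str.len_eq m
        omega
      · rw [← hM] at hmm
        rcases List.mem_map.mp hmm with ⟨kv, hkv, hlen⟩
        rw [← hlen]
        exact hmax _ (List.mem_map_of_mem hkv)
    omega
  -- finished ↔ not bad
  have hco : ∀ i, PySem.Set.contains bad i
      = data.any (fun kv => PySem.Str.len kv.1 == i && kv.2 == "") := by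
    intro i
    have hiff : (PySem.Set.contains bad i = true)
        ↔ (data.any (fun kv => PySem.Str.len kv.1 == i && kv.2 == "") = true) := by
      rw [PySem.Set.contains_iff, hbad, pv_mem_bad_gen, List.any_eq_true]
      constructor
      · rintro (h | ⟨kv, hkv, he, hl⟩)
        · simp [PySem.Set.empty] at h
        · exact ⟨kv, hkv, by rw [Bool.and_eq_true_iff, beq_iff_eq, beq_iff_eq]; exact ⟨hl, he⟩⟩
      · rintro ⟨kv, hkv, hp⟩
        rw [Bool.and_eq_true_iff, beq_iff_eq, beq_iff_eq] at hp
        exact Or.inr ⟨kv, hkv, hp.2, hp.1⟩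
    rcases hb : data.any (fun kv => PySem.Str.len kv.1 == i && kv.2 == "") with _ | _
    · rw [hb] at hiff
      exact Bool.eq_false_iff.mpr (fun hc => Bool.false_ne_true (hiff.mp hc))
    · exact hiff.mpr hb
  have hfin : ∀ i, pvFinishedAt data i = !(PySem.Set.contains bad i) := by
    intro i
    rw [pv_finishedAt_eq data hnd i, hco i]
  -- assemble
  simp only [hLM]
  by_cases hz : M = 0
  · simp only [hz, if_neg (by omega : ¬ (0:Int) ≠ 0)]
    rw [PySem.List.pyRange_neg_one_eq_nil (by omega : (0:Int) ≤ 0)]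
    rfl
  · rw [if_pos hz]
    exact pv_scan_eq data bad hfin _

-- ===== VERDICT (by name: the statement is the Claim_ definition above) =====
theorem find_max_finished_layer_spec : Claim_equal_find_max_finished_layer := by
  intro data _ hpre
  exact pv_main data hpre.1 hpre.2
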